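-- pv_equiv track=rewrite | github.com/pypi-data/pypi-mirror-400 | packages/NepTrainKit/neptrainkit-2.8.1-cp310-cp310-macosx_15_0_arm64.whl/NepTrainKit/core/structure.py | _normalise_comment_path_parts
-- ===== SOURCE A (Python) =====
-- def _normalise_comment_path_parts(raw_path: str) -> list[str]:
--     """Convert DeepMD output comment paths into clean path segments."""
--     normalised: list[str] = []
--     for part in raw_path.replace("\\", "/").split("/"):
--         part = part.strip()
--         if not part or part == ".":
--             continue
--         if part == "..":
--             if normalised:
--                 normalised.pop()
--             continue
--         normalised.append(part)
--     return normalised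
-- ===== SOURCE B (Python) =====
-- def _normalise_comment_path_parts(raw_path: str) -> list[str]:
--     """Convert DeepMD output comment paths into clean path segments."""
--     tokens = [p.strip() for p in raw_path.replace("\\", "/").split("/")]
--     tokens = [p for p in tokens if p and p != "."]
--     resolved: list[str] = []
--     skip = 0
--     for part in reversed(tokens):
--         if part == "..":
--             skip += 1
--         elif skip:
--             skip -= 1
--         else:
--             resolved.append(part)
--     resolved.reverse()
--     return resolved
-- ===== Notes on version B (the rewrite author's own statement) =====
-- stated objective: alternative
-- what changed: B first filters the cleaned tokens, then resolves parent-reference tokens by a single right-to-left scan with a skip counter (reversing the collected survivors), instead of A's single forward loop maintaining a mutable stack that pops.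
import Mathlib
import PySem

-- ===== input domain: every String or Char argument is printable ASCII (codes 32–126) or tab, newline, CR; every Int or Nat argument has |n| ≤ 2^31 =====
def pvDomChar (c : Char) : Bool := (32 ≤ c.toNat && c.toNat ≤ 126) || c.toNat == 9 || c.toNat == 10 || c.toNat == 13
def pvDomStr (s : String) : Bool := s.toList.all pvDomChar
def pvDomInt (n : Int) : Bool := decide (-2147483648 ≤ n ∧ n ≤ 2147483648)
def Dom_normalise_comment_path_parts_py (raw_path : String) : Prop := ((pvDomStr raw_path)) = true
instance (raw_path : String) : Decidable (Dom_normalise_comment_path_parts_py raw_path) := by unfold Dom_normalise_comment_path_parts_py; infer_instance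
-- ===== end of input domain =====

-- B resolves '..' with a right-to-left skip counter over pre-filtered tokens instead of A's forward stack loop; objective: alternative.

-- ===== PORT A =====
-- one loop iteration of A (strip, skip empty/'.', pop on '..', else append)
def pvAStep (normalised : List String) (part : String) : List String :=
  let part := PySem.Str.strip part
  if part = "" ∨ part = "." then normalised
  else if part = ".." then (if normalised ≠ [] then normalised.dropLast else normalised)
  else normalised ++ [part]

def normalise_comment_path_parts_py (raw_path : String) : List String :=
  ((PySem.Str.split? (PySem.Str.replace raw_path "\\" "/") "/").getD []).foldl pvAStep []

-- ===== PORT B =====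
def pvBTokens (raw_path : String) : List String :=
  (((PySem.Str.split? (PySem.Str.replace raw_path "\\" "/") "/").getD []).map PySem.Str.strip).filter
    (fun p => !(p = "" ∨ p = "." : Bool))

-- one iteration of B's reversed-order loop; state = (skip, resolved-so-far in reversed order)
def pvBStep (s : Nat × List String) (part : String) : Nat × List String :=
  if part = ".." then (s.1 + 1, s.2)
  else if s.1 ≠ 0 then (s.1 - 1, s.2)
  else (s.1, s.2 ++ [part])

def normalise_comment_path_parts_py_alt (raw_path : String) : List String :=
  (((pvBTokens raw_path).reverse.foldl pvBStep (0, [])).2).reverse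

-- ===== PRECONDITION & SPEC =====
def Spec_normalise_comment_path_parts_py (raw_path : String) (out : List String) : Prop := out = normalise_comment_path_parts_py_alt raw_path
instance (raw_path : String) (out : List String) : Decidable (Spec_normalise_comment_path_parts_py raw_path out) := by unfold Spec_normalise_comment_path_parts_py; infer_instance

-- ===== CLAIM (what is proved, stated in full; the proofs are below) =====
def Claim_equal_normalise_comment_path_parts_py : Prop := ∀ (raw_path : String), Dom_normalise_comment_path_parts_py raw_path → Spec_normalise_comment_path_parts_py raw_path (normalise_comment_path_parts_py raw_path)

-- ===== LEMMAS AND PROOFS =====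

-- right-to-left resolution of '..' over an already-clean token list, structural form
def pvG : List String → Nat × List String
  | [] => (0, [])
  | t :: ts =>
    let s := pvG ts
    if t = ".." then (s.1 + 1, s.2)
    else if s.1 ≠ 0 then (s.1 - 1, s.2)
    else (s.1, t :: s.2)

-- k-fold dropLast
def pvDlk : Nat → List String → List String
  | 0, l => l
  | k + 1, l => pvDlk k l.dropLast

-- A's step on an already-clean token
def pvCleanStep (st : List String) (t : String) : List String :=
  if t = ".." then st.dropLast else st ++ [t]

theorem pvDlk_nil (k : Nat) : pvDlk k [] = [] := by
  induction k with
  | zero => rfl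
  | succ k ih => simpa [pvDlk] using ih

theorem pvFoldB (ts : List String) :
    ts.reverse.foldl pvBStep (0, []) = ((pvG ts).1, (pvG ts).2.reverse) := by
  induction ts with
  | nil => rfl
  | cons t ts ih =>
    simp only [List.reverse_cons, List.foldl_append, List.foldl_cons, List.foldl_nil, ih]
    by_cases h : t = ".." <;> by_cases hk : (pvG ts).1 = 0 <;>
      simp [pvBStep, pvG, h, hk]

theorem pvFoldClean (ts : List String) : ∀ st : List String,
    ts.foldl pvCleanStep st = pvDlk (pvG ts).1 st ++ (pvG ts).2 := by
  induction ts with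
  | nil => intro st; simp [pvG, pvDlk]
  | cons t ts ih =>
    intro st
    by_cases h : t = ".."
    · simp only [List.foldl_cons, pvCleanStep, h, ih, pvG]
      simp [pvDlk]
    · by_cases hk : (pvG ts).1 = 0
      · simp [List.foldl_cons, pvCleanStep, h, ih, pvG, hk, pvDlk]
      · obtain ⟨m, hm⟩ := Nat.exists_eq_succ_of_ne_zero hk
        simp [List.foldl_cons, pvCleanStep, h, ih, pvG, hm, pvDlk]

theorem pvFoldA (parts : List String) : ∀ st : List String,
    parts.foldl pvAStep st =
      ((parts.map PySem.Str.strip).filter (fun p => !(p = "" ∨ p = "." : Bool))).foldl pvCleanStep st := by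
  induction parts with
  | nil => intro st; rfl
  | cons p parts ih =>
    intro st
    simp only [List.foldl_cons, List.map_cons, List.filter_cons]
    by_cases hf : (PySem.Str.strip p = "" ∨ PySem.Str.strip p = ".")
    · simp [pvAStep, hf, ih]
    · have h1 : PySem.Str.strip p ≠ "" := fun h => hf (Or.inl h)
      have h2 : PySem.Str.strip p ≠ "." := fun h => hf (Or.inr h)
      by_cases h3 : PySem.Str.strip p = ".."
      · simp only [pvAStep, h3, ih, Bool.not_eq_true']
        simp [pvCleanStep]
        by_cases hst : st = [] <;> simp [hst]
      · simp only [pvAStep, if_neg hf, if_neg h3, ih]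
        simp [pvCleanStep, hf, h3]

-- ===== VERDICT (by name: the statement is the Claim_ definition above) =====
theorem normalise_comment_path_parts_py_spec : Claim_equal_normalise_comment_path_parts_py := by
  intro raw _
  unfold Spec_normalise_comment_path_parts_py normalise_comment_path_parts_py
    normalise_comment_path_parts_py_alt pvBTokens
  rw [pvFoldA, pvFoldClean, pvFoldB]
  simp [pvDlk_nil]
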